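-- pv_equiv track=rewrite | github.com/pypi-data/pypi-mirror-46 | packages/pykg2vec/pykg2vec-0.0.42-py3-none-any.whl/pykg2vec/utils/eval_test.py | eval_batch_head
-- ===== SOURCE A (Python) =====
-- def eval_batch_head(id_replace_head, tr_h, e1, e2, r_rev):
--     hrank = 0
--     fhrank = 0
--
--     for j in range(len(id_replace_head)):
--         val = id_replace_head[-j - 1]
--         if val == e1:
--             break
--         else:
--             hrank += 1
--             fhrank += 1
--             if val in tr_h[(e2, r_rev)]:
--                 fhrank -= 1
--
--     return hrank, fhrank
-- ===== SOURCE B (Python) =====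
-- def eval_batch_head(id_replace_head, tr_h, e1, e2, r_rev):
--     rev = id_replace_head[::-1]
--     k = rev.index(e1) if e1 in rev else len(rev)
--     suffix = rev[:k]
--     hrank = k
--     if suffix:
--         filt = tr_h[(e2, r_rev)]
--         fhrank = hrank - sum(1 for v in suffix if v in filt)
--     else:
--         fhrank = hrank
--     return hrank, fhrank
-- ===== Notes on version B (the rewrite author's own statement) =====
-- stated objective: alternative
-- what changed: A's single fused index loop (negative indexing with per-iteration dict lookup, break on e1) is split into two phases: reverse the list and locate the first occurrence of e1 to get the prefix, then fetch the filter list once and count filtered members of that prefix; the dict is accessed once instead of per iteration.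
import Mathlib
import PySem

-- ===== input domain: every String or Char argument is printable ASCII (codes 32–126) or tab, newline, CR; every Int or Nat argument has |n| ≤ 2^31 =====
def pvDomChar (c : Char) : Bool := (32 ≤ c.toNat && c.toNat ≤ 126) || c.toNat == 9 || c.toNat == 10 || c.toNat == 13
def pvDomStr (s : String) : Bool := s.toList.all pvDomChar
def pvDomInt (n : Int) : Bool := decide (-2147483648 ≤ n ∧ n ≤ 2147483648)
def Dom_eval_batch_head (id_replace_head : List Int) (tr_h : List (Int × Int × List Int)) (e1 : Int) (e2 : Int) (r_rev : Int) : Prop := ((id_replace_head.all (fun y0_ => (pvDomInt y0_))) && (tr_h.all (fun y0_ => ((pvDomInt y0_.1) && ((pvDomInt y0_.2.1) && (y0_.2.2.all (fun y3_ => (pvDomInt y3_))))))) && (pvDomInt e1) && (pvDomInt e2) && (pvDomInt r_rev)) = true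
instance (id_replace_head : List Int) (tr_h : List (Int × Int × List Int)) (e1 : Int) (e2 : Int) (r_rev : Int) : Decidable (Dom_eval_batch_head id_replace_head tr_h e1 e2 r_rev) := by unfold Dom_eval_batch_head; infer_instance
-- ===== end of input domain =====

-- B replaces A's fused index loop (break on e1, dict lookup each iteration) by a two-phase
-- decomposition: find the prefix of the reversed list before e1, then one dict fetch and a
-- membership count over that prefix ("alternative" objective; same return value).

-- ===== PORT A =====
-- dict access tr_h[(e2, r_rev)]: first entry whose key matches, none = KeyError
def pvLookupA (tr_h : List (Int × Int × List Int)) (e2 r_rev : Int) : Option (List Int) :=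
  match tr_h with
  | [] => none
  | (a, b, v) :: rest => if a = e2 ∧ b = r_rev then some v else pvLookupA rest e2 r_rev

-- the 'for j in range(len(id_replace_head))' loop with its break
def evalHeadGo (xs : List Int) (tr_h : List (Int × Int × List Int)) (e1 e2 r_rev : Int) (j : Nat) (hrank fhrank : Int) : Int × Int :=
  if j < xs.length then
    match PySem.List.pyGet? xs (-(j : Int) - 1) with
    | none => (hrank, fhrank)     -- unreachable (index in range)
    | some val =>
      if val = e1 then (hrank, fhrank)     -- break
      else
        match pvLookupA tr_h e2 r_rev with
        | none => (hrank + 1, fhrank + 1)  -- Python raises KeyError here; excluded by Pre_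
        | some filt =>
          evalHeadGo xs tr_h e1 e2 r_rev (j + 1) (hrank + 1)
            (fhrank + 1 - (if val ∈ filt then 1 else 0))
  else (hrank, fhrank)
termination_by xs.length - j

def eval_batch_head (id_replace_head : List Int) (tr_h : List (Int × Int × List Int)) (e1 : Int) (e2 : Int) (r_rev : Int) : Int × Int :=
  evalHeadGo id_replace_head tr_h e1 e2 r_rev 0 0 0

-- ===== PORT B =====
-- dict access via a single first-match scan
def pvLookupB (tr_h : List (Int × Int × List Int)) (e2 r_rev : Int) : Option (List Int) :=
  (tr_h.find? (fun p => p.1 == e2 && p.2.1 == r_rev)).map (fun p => p.2.2)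

def eval_batch_head_alt (id_replace_head : List Int) (tr_h : List (Int × Int × List Int)) (e1 : Int) (e2 : Int) (r_rev : Int) : Int × Int :=
  let rev := id_replace_head.reverse                       -- id_replace_head[::-1]
  let k : Nat := (PySem.List.index? rev e1).getD rev.length -- rev.index(e1) if e1 in rev else len(rev)
  let suffix := rev.take k                                  -- rev[:k]
  let hrank : Int := (k : Int)
  match suffix with
  | [] => (hrank, hrank)
  | _ :: _ =>
    match pvLookupB tr_h e2 r_rev with
    | none => (hrank, hrank)       -- Python raises KeyError here; excluded by Pre_
    | some filt => (hrank, hrank - ((suffix.filter (fun v => decide (v ∈ filt))).length : Int))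

-- ===== PRECONDITION & SPEC =====
-- Pre_ excludes exactly the inputs on which both Pythons raise KeyError: the key (e2, r_rev)
-- is absent from tr_h while the loop/count actually reaches a dict access (the list is
-- non-empty and its last element differs from e1).
def Pre_eval_batch_head (id_replace_head : List Int) (tr_h : List (Int × Int × List Int)) (e1 : Int) (e2 : Int) (r_rev : Int) : Prop :=
  id_replace_head = [] ∨ id_replace_head.getLast? = some e1 ∨ ∃ p ∈ tr_h, p.1 = e2 ∧ p.2.1 = r_rev

instance (id_replace_head : List Int) (tr_h : List (Int × Int × List Int)) (e1 : Int) (e2 : Int) (r_rev : Int) : Decidable (Pre_eval_batch_head id_replace_head tr_h e1 e2 r_rev) := by unfold Pre_eval_batch_head; infer_instance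

def pvWitness_eval_batch_head : List Int × (List (Int × Int × List Int)) × Int × Int × Int :=
  ([1, 2, 3], [(5, 7, [2])], 1, 5, 7)

def Spec_eval_batch_head (id_replace_head : List Int) (tr_h : List (Int × Int × List Int)) (e1 : Int) (e2 : Int) (r_rev : Int) (out : Int × Int) : Prop := out = eval_batch_head_alt id_replace_head tr_h e1 e2 r_rev
instance (id_replace_head : List Int) (tr_h : List (Int × Int × List Int)) (e1 : Int) (e2 : Int) (r_rev : Int) (out : Int × Int) : Decidable (Spec_eval_batch_head id_replace_head tr_h e1 e2 r_rev out) := by unfold Spec_eval_batch_head; infer_instance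

-- ===== CLAIM (what is proved, stated in full; the proofs are below) =====
def Claim_equal_eval_batch_head : Prop := ∀ (id_replace_head : List Int) (tr_h : List (Int × Int × List Int)) (e1 : Int) (e2 : Int) (r_rev : Int), Dom_eval_batch_head id_replace_head tr_h e1 e2 r_rev → Pre_eval_batch_head id_replace_head tr_h e1 e2 r_rev → Spec_eval_batch_head id_replace_head tr_h e1 e2 r_rev (eval_batch_head id_replace_head tr_h e1 e2 r_rev)

-- ===== LEMMAS AND PROOFS =====

-- abstract form of A's loop once the dict value is fixed
def goL (filt : List Int) (e1 : Int) : List Int → Int × Int → Int × Int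
  | [], (h, f) => (h, f)
  | v :: rest, (h, f) =>
    if v = e1 then (h, f)
    else goL filt e1 rest (h + 1, f + 1 - (if v ∈ filt then 1 else 0))

theorem pvLookupA_eq_B (tr_h : List (Int × Int × List Int)) (e2 r_rev : Int) :
    pvLookupA tr_h e2 r_rev = pvLookupB tr_h e2 r_rev := by
  induction tr_h with
  | nil => rfl
  | cons p rest ih =>
    obtain ⟨a, b, v⟩ := p
    by_cases h : a = e2 ∧ b = r_rev
    · simp [pvLookupA, pvLookupB, h.1, h.2]
    · have hb : (a == e2 && b == r_rev) = false := by
        rcases not_and_or.mp h with h' | h' <;> simp [h']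
      rw [pvLookupA, if_neg h, pvLookupB, List.find?_cons_of_neg, ← pvLookupB]
      · exact ih
      · simp [hb]

theorem pvLookupA_ne_none (tr_h : List (Int × Int × List Int)) (e2 r_rev : Int)
    (h : ∃ p ∈ tr_h, p.1 = e2 ∧ p.2.1 = r_rev) : pvLookupA tr_h e2 r_rev ≠ none := by
  induction tr_h with
  | nil => simp at h
  | cons p rest ih =>
    obtain ⟨a, b, v⟩ := p
    by_cases hk : a = e2 ∧ b = r_rev
    · simp [pvLookupA, hk]
    · simp only [pvLookupA, if_neg hk]
      apply ih
      rcases h with ⟨q, hq, hq2⟩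
      rcases List.mem_cons.mp hq with rfl | hq'
      · exact absurd hq2 hk
      · exact ⟨q, hq', hq2⟩

theorem evalHeadGo_eq_goL (xs : List Int) (tr_h : List (Int × Int × List Int))
    (e1 e2 r_rev : Int) (filt : List Int) (hl : pvLookupA tr_h e2 r_rev = some filt) :
    ∀ j (h f : Int), j ≤ xs.length →
      evalHeadGo xs tr_h e1 e2 r_rev j h f = goL filt e1 (xs.reverse.drop j) (h, f) := by
  intro j
  induction hj : xs.length - j using Nat.strong_induction_on generalizing j with
  | _ n ih =>
  intro h f hjle
  by_cases hlt : j < xs.length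
  · have hjr : j < xs.reverse.length := by simpa using hlt
    have hget : PySem.List.pyGet? xs (-(j : Int) - 1) = some xs.reverse[j] := by
      have h1 : (-(j : Int) - 1) = -((j + 1 : Nat) : Int) := by push_cast; ring
      rw [h1, PySem.List.pyGet?_neg_natCast xs (j + 1) (by omega) (by omega)]
      have h2 : xs[xs.length - (j + 1)]? = some xs[xs.length - (j + 1)] :=
        List.getElem?_eq_getElem (by omega)
      rw [h2]
      congr 1
      rw [List.getElem_reverse]
      congr 1
      omega
    have hdrop : xs.reverse.drop j = xs.reverse[j] :: xs.reverse.drop (j + 1) :=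
      List.drop_eq_getElem_cons hjr
    rw [evalHeadGo, if_pos hlt, hget, hdrop]
    dsimp only
    by_cases he : xs.reverse[j] = e1
    · simp [goL, he]
    · rw [if_neg he, hl]
      simp only [goL, if_neg he]
      exact ih (xs.length - (j + 1)) (by omega) (j + 1) rfl _ _ (by omega)
  · have hj' : j = xs.length := by omega
    rw [evalHeadGo, if_neg hlt]
    rw [hj', List.drop_of_length_le (by simp)]
    rfl

-- prefix of l strictly before the first e1
def pfx (e1 : Int) (l : List Int) : List Int := l.takeWhile (fun v => !(v == e1))

theorem goL_closed (filt : List Int) (e1 : Int) :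
    ∀ (l : List Int) (h f : Int),
      goL filt e1 l (h, f) =
        (h + ((pfx e1 l).length : Int),
         f + ((pfx e1 l).length : Int) - (((pfx e1 l).filter (fun v => decide (v ∈ filt))).length : Int)) := by
  intro l
  induction l with
  | nil => intro h f; simp [goL, pfx]
  | cons v rest ih =>
    intro h f
    by_cases he : v = e1
    · simp [goL, he, pfx]
    · have hb : (!(v == e1)) = true := by simp [he]
      rw [goL, if_neg he, ih]
      simp only [pfx, List.takeWhile_cons, hb, if_true]
      by_cases hm : v ∈ filt <;>
        simp [hm] <;>
        constructor <;> ring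

theorem take_pfx (e1 : Int) (l : List Int) :
    l.take ((PySem.List.index? l e1).getD l.length) = pfx e1 l := by
  induction l with
  | nil => rfl
  | cons v rest ih =>
    by_cases he : v = e1
    · subst he
      rw [PySem.List.index?_cons_self]
      simp [pfx]
    · rw [PySem.List.index?_cons_of_ne rest he]
      have hp : pfx e1 (v :: rest) = v :: pfx e1 rest := by
        simp [pfx, he]
      rw [hp]
      cases hidx : PySem.List.index? rest e1 with
      | none =>
        simp only [hidx, Option.getD_none] at ih
        simp [List.take_succ_cons, ih]
      | some k =>
        simp only [hidx, Option.getD_some] at ih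
        simp [List.take_succ_cons, ih]

theorem eval_batch_head_alt_closed (id_replace_head : List Int) (tr_h : List (Int × Int × List Int))
    (e1 e2 r_rev : Int) (filt : List Int) (hl : pvLookupB tr_h e2 r_rev = some filt) :
    eval_batch_head_alt id_replace_head tr_h e1 e2 r_rev =
      (((pfx e1 id_replace_head.reverse).length : Int),
       ((pfx e1 id_replace_head.reverse).length : Int) -
         (((pfx e1 id_replace_head.reverse).filter (fun v => decide (v ∈ filt))).length : Int)) := by
  have hk : ((PySem.List.index? id_replace_head.reverse e1).getD id_replace_head.reverse.length : Int)
      = ((pfx e1 id_replace_head.reverse).length : Int) := by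
    rw [← take_pfx]
    congr 1
    rw [List.length_take]
    cases hidx : PySem.List.index? id_replace_head.reverse e1 with
    | none => simp
    | some k =>
      obtain ⟨hkl, _⟩ := PySem.List.getElem_of_index?_eq_some hidx
      simp only [Option.getD_some, List.length_reverse] at hkl ⊢
      omega
  simp only [eval_batch_head_alt, take_pfx, hk]
  cases hp : pfx e1 id_replace_head.reverse with
  | nil => simp
  | cons a as => simp only [hl]

theorem pre_none_cases (id_replace_head : List Int) (tr_h : List (Int × Int × List Int))
    (e1 e2 r_rev : Int)
    (hpre : Pre_eval_batch_head id_replace_head tr_h e1 e2 r_rev)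
    (hn : pvLookupA tr_h e2 r_rev = none) :
    id_replace_head = [] ∨ id_replace_head.getLast? = some e1 := by
  rcases hpre with h | h | h
  · exact Or.inl h
  · exact Or.inr h
  · exact absurd hn (pvLookupA_ne_none tr_h e2 r_rev h)

-- ===== VERDICT (by name: the statement is the Claim_ definition above) =====
theorem eval_batch_head_spec : Claim_equal_eval_batch_head := by
  intro xs tr_h e1 e2 r_rev _ hpre
  unfold Spec_eval_batch_head eval_batch_head
  cases hl : pvLookupA tr_h e2 r_rev with
  | some filt =>
    rw [evalHeadGo_eq_goL xs tr_h e1 e2 r_rev filt hl 0 0 0 (by omega)]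
    rw [List.drop_zero, goL_closed]
    rw [eval_batch_head_alt_closed xs tr_h e1 e2 r_rev filt (by rw [← pvLookupA_eq_B]; exact hl)]
    simp
  | none =>
    rcases pre_none_cases xs tr_h e1 e2 r_rev hpre hl with h | h
    · subst h
      simp [evalHeadGo, eval_batch_head_alt, PySem.List.index?_eq_idxOf?]
    · obtain ⟨ys, rfl⟩ : ∃ ys, xs = ys ++ [e1] := by
        rcases List.eq_nil_or_concat xs with rfl | ⟨ys, a, rfl⟩
        · simp at h
        · rw [List.concat_eq_append, List.getLast?_concat] at h
          exact ⟨ys, by simp_all [List.concat_eq_append]⟩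
      have hA : evalHeadGo (ys ++ [e1]) tr_h e1 e2 r_rev 0 0 0 = (0, 0) := by
        rw [evalHeadGo]
        have hlen : (0 : Nat) < (ys ++ [e1]).length := by simp
        have hg : PySem.List.pyGet? (ys ++ [e1]) (-((0 : Nat) : Int) - 1) = some e1 := by
          simp only [Nat.cast_zero, neg_zero, zero_sub]
          exact PySem.List.pyGet?_neg_one_append_singleton ys e1
        rw [if_pos hlen, hg]
        simp
      have hB : eval_batch_head_alt (ys ++ [e1]) tr_h e1 e2 r_rev = (0, 0) := by
        have hrev : (ys ++ [e1]).reverse = e1 :: ys.reverse := by simp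
        simp only [eval_batch_head_alt, hrev, PySem.List.index?_cons_self]
        simp
      rw [hA, hB]
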